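-- pv_equiv track=rewrite | github.com/hawt24/A2SV | Piling Up!.py | func
-- ===== SOURCE A (Python) =====
-- def func(bloks):
--     left=0
--     right=len(bloks)-1
--     compare=float("inf")
--     while left<=right:
--        if bloks[left]>=bloks[right] and bloks[left]<=compare:
--         compare=bloks[left]
--         left+=1
--        elif bloks[left]<bloks[right] and bloks[right]<=compare:
--         compare=bloks[right]
--         right-=1
--        else:
--         return "No"
--     return "Yes"
-- ===== SOURCE B (Python) =====
-- def func(bloks):
--     ascending = False
--     for a, b in zip(bloks, bloks[1:]):
--         if a < b:
--             ascending = True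
--         elif b < a and ascending:
--             return "No"
--     return "Yes"
-- ===== Notes on version B (the rewrite author's own statement) =====
-- stated objective: simpler
-- what changed: Replaced the two-pointer greedy merge with compare-tracking by a single forward pass over adjacent pairs that rejects exactly when a strict descent follows a strict ascent (valley-shape test).
import Mathlib
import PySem

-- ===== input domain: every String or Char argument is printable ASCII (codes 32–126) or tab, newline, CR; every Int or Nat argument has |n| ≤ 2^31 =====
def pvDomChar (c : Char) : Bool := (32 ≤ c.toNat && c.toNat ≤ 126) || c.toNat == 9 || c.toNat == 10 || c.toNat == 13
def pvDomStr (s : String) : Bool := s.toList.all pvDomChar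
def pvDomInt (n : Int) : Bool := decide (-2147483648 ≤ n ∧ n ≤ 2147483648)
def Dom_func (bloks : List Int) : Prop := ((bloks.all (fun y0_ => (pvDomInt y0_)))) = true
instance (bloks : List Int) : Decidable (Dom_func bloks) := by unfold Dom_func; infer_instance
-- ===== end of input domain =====

-- B changes the algorithm: a single forward pass over adjacent pairs with an "ascending seen" flag
-- replaces A's two-pointer inward greedy with a running ceiling; same O(n) cost, plainer code.

-- ===== PORT A =====
-- compare starts at float("inf"): modelled as Option Int, none = +inf
def leC (x : Int) (c : Option Int) : Bool :=
  match c with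
  | none => true
  | some v => decide (x ≤ v)

def funcLoop (bloks : List Int) (left right : Int) (compare : Option Int) : String :=
  if _h : left ≤ right then
    match PySem.List.pyGet? bloks left, PySem.List.pyGet? bloks right with
    | some l, some r =>
      if r ≤ l ∧ leC l compare = true then funcLoop bloks (left + 1) right (some l)
      else if l < r ∧ leC r compare = true then funcLoop bloks left (right - 1) (some r)
      else "No"
    | _, _ => "No"   -- unreachable from func's call (indices stay in range)
  else "Yes"
termination_by (right + 1 - left).toNat
decreasing_by all_goals omega

def func (bloks : List Int) : String :=
  funcLoop bloks 0 ((bloks.length : Int) - 1) none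

-- ===== PORT B =====
def scanB : List (Int × Int) → Bool → String
  | [], _ => "Yes"
  | (a, b) :: rest, asc =>
    if a < b then scanB rest true
    else if b < a ∧ asc = true then "No"
    else scanB rest asc

def func_alt (bloks : List Int) : String :=
  scanB (bloks.zip bloks.tail) false

-- ===== PRECONDITION & SPEC =====
def Spec_func (bloks : List Int) (out : String) : Prop := out = func_alt bloks
instance (bloks : List Int) (out : String) : Decidable (Spec_func bloks out) := by unfold Spec_func; infer_instance

-- ===== CLAIM (what is proved, stated in full; the proofs are below) =====
def Claim_equal_func : Prop := ∀ (bloks : List Int), Dom_func bloks → Spec_func bloks (func bloks)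

-- ===== LEMMAS AND PROOFS =====

-- list-level model of A's loop: the remaining segment plus the running ceiling
def gm : List Int → Option Int → String
  | [], _ => "Yes"
  | x :: t, c =>
    let r := (x :: t).getLastD 0
    if r ≤ x ∧ leC x c = true then gm t (some x)
    else if x < r ∧ leC r c = true then gm ((x :: t).dropLast) (some r)
    else "No"
termination_by xs _ => xs.length
decreasing_by all_goals simp [List.length_dropLast]

-- valley shape: a non-increasing part followed by a non-decreasing part
def Valley (xs : List Int) : Prop :=
  ∃ ys zs, xs = ys ++ zs ∧ ys.Pairwise (fun a b => b ≤ a) ∧ zs.Pairwise (fun a b => a ≤ b)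

def ends (xs : List Int) : Int := max (xs.headD 0) (xs.getLastD 0)

lemma getLastD_cons_cons (z y : Int) (u : List Int) (d : Int) :
    ((z :: y :: u)).getLastD d = (y :: u).getLastD d := by
  simp [List.getLastD_eq_getLast?, List.getLast?_cons_cons]

lemma getLastD_mem (y : Int) (u : List Int) (d : Int) : (y :: u).getLastD d ∈ y :: u := by
  have := List.getLast_mem (l := y :: u) (by simp)
  simpa [List.getLastD_eq_getLast?, List.getLast?_eq_some_getLast] using this

lemma pairwise_le_getLastD {zs : List Int} (h : zs.Pairwise (fun a b => a ≤ b))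
    {a : Int} (ha : a ∈ zs) : a ≤ zs.getLastD 0 := by
  induction zs with
  | nil => simp at ha
  | cons z t ih =>
    rcases List.pairwise_cons.mp h with ⟨hz, ht⟩
    cases t with
    | nil => simp at ha; simp [ha]
    | cons y u =>
      rw [getLastD_cons_cons]
      rcases List.mem_cons.mp ha with rfl | hm
      · exact hz _ (getLastD_mem y u 0)
      · exact ih ht hm

lemma valley_nil : Valley [] := ⟨[], [], by simp, by simp, by simp⟩

lemma valley_singleton (x : Int) : Valley [x] := ⟨[x], [], by simp, by simp, by simp⟩

lemma valley_sublist {xs l : List Int} (h : Valley xs) (hs : List.Sublist l xs) : Valley l := by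
  rcases h with ⟨ys, zs, rfl, hys, hzs⟩
  rcases List.sublist_append_iff.mp hs with ⟨r1, r2, rfl, h1, h2⟩
  exact ⟨r1, r2, rfl, hys.sublist h1, hzs.sublist h2⟩

lemma valley_tail {x : Int} {t : List Int} (h : Valley (x :: t)) : Valley t :=
  valley_sublist h (List.sublist_cons_self x t)

lemma valley_dropLast {xs : List Int} (h : Valley xs) : Valley xs.dropLast :=
  valley_sublist h (List.dropLast_sublist xs)

lemma valley_cons_all {x : Int} {t : List Int} (h : Valley t) (hle : ∀ a ∈ t, a ≤ x) :
    Valley (x :: t) := by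
  rcases h with ⟨ys, zs, rfl, hys, hzs⟩
  refine ⟨x :: ys, zs, rfl, List.pairwise_cons.mpr ⟨?_, hys⟩, hzs⟩
  intro a ha
  exact hle a (by simp [ha])

lemma valley_append_all {ys : List Int} {r : Int} (h : Valley ys) (hle : ∀ a ∈ ys, a ≤ r) :
    Valley (ys ++ [r]) := by
  rcases h with ⟨us, vs, rfl, hus, hvs⟩
  refine ⟨us, vs ++ [r], by simp, hus, ?_⟩
  refine List.pairwise_append.mpr ⟨hvs, by simp, ?_⟩
  intro a ha b hb
  simp at hb
  subst hb
  exact hle a (by simp [ha])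

lemma valley_cons_head {x y : Int} {t : List Int} (h : Valley (y :: t)) (hxy : y ≤ x) :
    Valley (x :: y :: t) := by
  rcases h with ⟨ys, zs, he, hys, hzs⟩
  cases ys with
  | nil =>
    refine ⟨[x], zs, by simp [← he], by simp, hzs⟩
  | cons y' ys' =>
    have hy' : y' = y := by simpa using congrArg (fun l => l.headD 0) he.symm
    subst hy'
    refine ⟨x :: y' :: ys', zs, by simp [he], ?_, hzs⟩
    refine List.pairwise_cons.mpr ⟨?_, hys⟩
    intro a ha
    rcases List.mem_cons.mp ha with rfl | hm
    · exact hxy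
    · exact le_trans ((List.pairwise_cons.mp hys).1 a hm) hxy

lemma valley_of_pairwise {xs : List Int} (h : xs.Pairwise (fun a b => a ≤ b)) : Valley xs :=
  ⟨[], xs, by simp, by simp, h⟩

lemma elem_le_ends {xs : List Int} (h : Valley xs) {a : Int} (ha : a ∈ xs) : a ≤ ends xs := by
  rcases h with ⟨ys, zs, rfl, hys, hzs⟩
  rcases List.mem_append.mp ha with hm | hm
  · cases ys with
    | nil => simp at hm
    | cons h' t' =>
      have h1 : a ≤ h' := by
        rcases List.mem_cons.mp hm with rfl | hm'
        · exact le_refl a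
        · exact (List.pairwise_cons.mp hys).1 a hm'
      have h2 : ((h' :: t') ++ zs).headD 0 = h' := by simp
      exact le_trans h1 (by rw [ends]; rw [h2]; exact le_max_left _ _)
  · cases zs with
    | nil => simp at hm
    | cons h' t' =>
      have h1 : a ≤ (h' :: t').getLastD 0 := pairwise_le_getLastD hzs hm
      have h2 : (ys ++ h' :: t').getLastD 0 = (h' :: t').getLastD 0 := by
        simp [List.getLastD_eq_getLast?, List.getLast?_append, List.getLast?_eq_some_getLast (l := h'::t') (by simp)]
      exact le_trans h1 (by rw [ends, h2]; exact le_max_right _ _)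

lemma valley_ascent_pairwise {x y : Int} {t : List Int} (hxy : x < y)
    (h : Valley (x :: y :: t)) : (x :: y :: t).Pairwise (fun a b => a ≤ b) := by
  rcases h with ⟨ys, zs, he, hys, hzs⟩
  match ys, he with
  | [], he =>
    simp only [List.nil_append] at he
    rw [← he] at hzs; exact hzs
  | [a], he =>
    have hax : a = x := by simpa using congrArg (fun l => l.headD 0) he.symm
    subst hax
    have hz : zs = y :: t := by simpa using he.symm
    subst hz
    refine List.pairwise_cons.mpr ⟨?_, hzs⟩
    intro b hb
    rcases List.mem_cons.mp hb with rfl | hm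
    · exact le_of_lt hxy
    · exact le_trans (le_of_lt hxy) ((List.pairwise_cons.mp hzs).1 b hm)
  | a :: b :: ys', he =>
    have hax : a = x ∧ b = y := by
      have := he.symm
      simp at this
      exact ⟨this.1, this.2.1⟩
    rcases hax with ⟨rfl, rfl⟩
    exact absurd ((List.pairwise_cons.mp hys).1 b (by simp)) (not_le.mpr hxy)

lemma gm_cons_cons (x y : Int) (t : List Int) (c : Option Int) :
    gm (x :: y :: t) c =
      (if (y :: t).getLastD 0 ≤ x ∧ leC x c = true then gm (y :: t) (some x)
       else if x < (y :: t).getLastD 0 ∧ leC ((y :: t).getLastD 0) c = true then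
         gm (x :: (y :: t).dropLast) (some ((y :: t).getLastD 0))
       else "No") := by
  rw [gm]
  rw [show (x :: y :: t).getLastD 0 = (y :: t).getLastD 0 from getLastD_cons_cons x y t 0]
  rfl

-- A's loop characterisation
lemma gm_char : ∀ (n : Nat) (xs : List Int) (c : Option Int), xs.length = n →
    (gm xs c = "Yes" ↔ Valley xs ∧ (xs = [] ∨ leC (ends xs) c = true)) := by
  intro n
  induction n using Nat.strong_induction_on with
  | _ n ih =>
    intro xs c hlen
    cases xs with
    | nil => simpa [gm] using valley_nil
    | cons x t =>
      cases t with
      | nil =>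
        by_cases hc : leC x c = true
        · rw [show gm [x] c = gm [] (some x) from by simp [gm, hc]]
          simp [gm, valley_singleton, ends, hc]
        · rw [show gm [x] c = "No" from by simp [gm, hc]]
          have he : ends [x] = x := by
            simp only [ends, List.headD_cons]
            rw [show ([x] : List Int).getLastD 0 = x from rfl]
            exact max_self x
          constructor
          · intro h; exact absurd h (by decide)
          · rintro ⟨_, h⟩
            rcases h with h | h
            · simp at h
            · rw [he] at h; exact absurd h hc
      | cons y t' =>
        have hlt : (y :: t').length < n := by simp at hlen ⊢; omega
        have hltd : (x :: (y :: t').dropLast).length < n := by simp at hlen ⊢; omega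
        have hgc := gm_cons_cons x y t' c
        set r := (y :: t').getLastD 0 with hr
        have hrg : r = (x :: y :: t').getLast (by simp) := by
          rw [hr, List.getLastD_eq_getLast?, List.getLast?_eq_some_getLast (l := y :: t') (by simp),
            List.getLast_cons_cons]
          rfl
        have hr_mem : r ∈ x :: y :: t' := List.mem_cons_of_mem x (getLastD_mem y t' 0)
        have hends : ends (x :: y :: t') = max x r := by
          simp only [ends, List.headD_cons]
          rw [getLastD_cons_cons]
        have hne : x :: y :: t' ≠ [] := by simp
        have hxsplit : (x :: (y :: t').dropLast) ++ [r] = x :: y :: t' := by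
          rw [hrg, show x :: (y :: t').dropLast = (x :: y :: t').dropLast from by simp]
          exact List.dropLast_append_getLast (by simp)
        rcases le_or_gt r x with hrx | hxr
        · have hendsx : ends (x :: y :: t') = x := by rw [hends]; exact max_eq_left hrx
          by_cases hc : leC x c = true
          · rw [hgc, if_pos ⟨hrx, hc⟩, ih _ hlt (y :: t') (some x) rfl]
            constructor
            · rintro ⟨hv, hle⟩
              have hle' : leC (ends (y :: t')) (some x) = true := by
                rcases hle with h | h
                · exact absurd h (by simp)
                · exact h
              refine ⟨valley_cons_all hv ?_, Or.inr (by rw [hendsx]; exact hc)⟩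
              intro a ha
              exact le_trans (elem_le_ends hv ha) (by simpa [leC] using hle')
            · rintro ⟨hv, _⟩
              refine ⟨valley_tail hv, Or.inr ?_⟩
              have h1 : y ≤ x := by
                have := elem_le_ends hv (show y ∈ x :: y :: t' by simp)
                rwa [hendsx] at this
              have h2 : r ≤ x := by
                have := elem_le_ends hv hr_mem
                rwa [hendsx] at this
              simp only [leC, ends, List.headD_cons, ← hr, decide_eq_true_iff]
              exact max_le h1 h2
          · rw [hgc, if_neg (by rintro ⟨_, h2⟩; exact hc h2),
              if_neg (by rintro ⟨h1, _⟩; exact absurd h1 (not_lt.mpr hrx))]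
            constructor
            · intro h; exact absurd h (by decide)
            · rintro ⟨_, h⟩
              rcases h with h | h
              · exact absurd h hne
              · rw [hendsx] at h; exact absurd h hc
        · have hendsr : ends (x :: y :: t') = r := by rw [hends]; exact max_eq_right (le_of_lt hxr)
          by_cases hc : leC r c = true
          · rw [hgc, if_neg (by rintro ⟨h1, _⟩; exact absurd h1 (not_le.mpr hxr)), if_pos ⟨hxr, hc⟩,
              ih _ hltd (x :: (y :: t').dropLast) (some r) rfl]
            constructor
            · rintro ⟨hv, hle⟩
              have hle' : ends (x :: (y :: t').dropLast) ≤ r := by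
                rcases hle with h | h
                · exact absurd h (by simp)
                · simpa [leC] using h
              refine ⟨?_, Or.inr (by rw [hendsr]; exact hc)⟩
              rw [← hxsplit]
              refine valley_append_all hv ?_
              intro a ha
              exact le_trans (elem_le_ends hv ha) hle'
            · rintro ⟨hv, _⟩
              have hvd : Valley (x :: (y :: t').dropLast) := by
                have := valley_dropLast hv
                simpa using this
              refine ⟨hvd, Or.inr ?_⟩
              have hall : ∀ a ∈ x :: (y :: t').dropLast, a ≤ r := by
                intro a ha
                have hmem : a ∈ x :: y :: t' := by
                  rw [← hxsplit]; exact List.mem_append_left _ ha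
                have := elem_le_ends hv hmem
                rwa [hendsr] at this
              have h1 : x ≤ r := hall x (by simp)
              have h2 : (x :: (y :: t').dropLast).getLastD 0 ≤ r :=
                hall _ (getLastD_mem x ((y :: t').dropLast) 0)
              simp only [leC, ends, List.headD_cons, decide_eq_true_iff]
              exact max_le h1 h2
          · rw [hgc, if_neg (by rintro ⟨h1, _⟩; exact absurd h1 (not_le.mpr hxr)),
              if_neg (by rintro ⟨_, h2⟩; exact hc h2)]
            constructor
            · intro h; exact absurd h (by decide)
            · rintro ⟨_, h⟩
              rcases h with h | h
              · exact absurd h hne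
              · rw [hendsr] at h; exact absurd h hc

lemma gm_dichotomy : ∀ (n : Nat) (xs : List Int) (c : Option Int), xs.length = n →
    gm xs c = "Yes" ∨ gm xs c = "No" := by
  intro n
  induction n using Nat.strong_induction_on with
  | _ n ih =>
    intro xs c hlen
    match xs with
    | [] => left; simp [gm]
    | [x] =>
      by_cases hc : leC x c = true
      · rw [show gm [x] c = gm [] (some x) from by simp [gm, hc]]; left; simp [gm]
      · right; simp [gm, hc]
    | x :: y :: t =>
      rw [gm_cons_cons]
      split_ifs with h1 h2
      · exact ih (y :: t).length (by simp at hlen ⊢; omega) _ _ rfl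
      · exact ih (x :: (y :: t).dropLast).length (by simp at hlen ⊢; omega) _ _ rfl
      · right; rfl

-- bridge: A's index loop computes gm on the remaining slice
lemma funcLoop_eq_gm : ∀ (k : Nat) (bloks : List Int) (left right : Int) (c : Option Int),
    (right + 1 - left).toNat = k → 0 ≤ left → right < (bloks.length : Int) →
    funcLoop bloks left right c = gm ((bloks.drop left.toNat).take k) c := by
  intro k
  induction k using Nat.strong_induction_on with
  | _ k ih =>
    intro bloks left right c hk h0 hlt
    by_cases hlr : left ≤ right
    · have hk1 : 1 ≤ k := by omega
      have hltn : left.toNat < bloks.length := by omega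
      have hrn : right.toNat < bloks.length := by omega
      have hidx : left.toNat + (k - 1) = right.toNat := by omega
      have hseg : (bloks.drop left.toNat).take k =
          bloks[left.toNat] :: ((bloks.drop (left.toNat + 1)).take (k - 1)) := by
        cases k with
        | zero => omega
        | succ k' => rw [List.drop_eq_getElem_cons hltn, List.take_succ_cons]; simp
      have hlen_seg : ((bloks.drop left.toNat).take k).length = k := by
        simp only [List.length_take, List.length_drop]
        omega
      have hlast : ((bloks.drop left.toNat).take k).getLastD 0 = bloks[right.toNat] := by
        rw [List.getLastD_eq_getLast?, List.getLast?_eq_getElem?, hlen_seg]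
        rw [show ((bloks.drop left.toNat).take k)[k - 1]? = (bloks.drop left.toNat)[k - 1]? from by
          simp [Nat.sub_lt hk1 Nat.one_pos]]
        rw [List.getElem?_drop, hidx, List.getElem?_eq_getElem hrn]
        rfl
      have hgl : PySem.List.pyGet? bloks left = some bloks[left.toNat] := by
        rw [show PySem.List.pyGet? bloks left = bloks[left.toNat]? from
          PySem.List.pyGet?_of_nonneg bloks h0, List.getElem?_eq_getElem hltn]
      have hgr : PySem.List.pyGet? bloks right = some bloks[right.toNat] := by
        rw [show PySem.List.pyGet? bloks right = bloks[right.toNat]? from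
          PySem.List.pyGet?_of_nonneg bloks (le_trans h0 hlr), List.getElem?_eq_getElem hrn]
      have hdrop_last : ((bloks.drop left.toNat).take k).dropLast =
          (bloks.drop left.toNat).take (k - 1) := by
        rw [List.dropLast_eq_take, hlen_seg, List.take_take]
        congr 1
        omega
      rw [funcLoop, dif_pos hlr]
      simp only [hgl, hgr]
      rw [hseg] at hlast hdrop_last ⊢
      rw [gm, hlast]
      by_cases hb1 : bloks[right.toNat] ≤ bloks[left.toNat] ∧ leC bloks[left.toNat] c = true
      · rw [if_pos hb1, if_pos hb1]
        have hrec := ih (k - 1) (by omega) bloks (left + 1) right (some bloks[left.toNat])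
          (by omega) (by omega) hlt
        rw [hrec, show (left + 1).toNat = left.toNat + 1 from by omega]
      · rw [if_neg hb1, if_neg hb1]
        by_cases hb2 : bloks[left.toNat] < bloks[right.toNat] ∧ leC bloks[right.toNat] c = true
        · rw [if_pos hb2, if_pos hb2]
          have hrec := ih (k - 1) (by omega) bloks left (right - 1) (some bloks[right.toNat])
            (by omega) h0 (by omega)
          rw [hrec, hdrop_last]
        · rw [if_neg hb2, if_neg hb2]
    · rw [funcLoop, dif_neg hlr]
      have hk0 : k = 0 := by omega
      rw [hk0]
      simp [gm]

lemma func_eq_gm (bloks : List Int) : func bloks = gm bloks none := by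
  unfold func
  rw [funcLoop_eq_gm bloks.length bloks 0 ((bloks.length : Int) - 1) none (by omega) (by omega)
    (by omega)]
  simp

-- B's scan characterisation
lemma scanB_true : ∀ (ps : List (Int × Int)), scanB ps true = "Yes" ↔ ∀ p ∈ ps, p.1 ≤ p.2 := by
  intro ps
  induction ps with
  | nil => simp [scanB]
  | cons p rest ih =>
    obtain ⟨a, b⟩ := p
    rcases lt_trichotomy a b with hab | hab | hab
    · rw [show scanB ((a, b) :: rest) true = scanB rest true from by rw [scanB]; simp [hab]]
      rw [ih]
      constructor
      · intro h q hq
        rcases List.mem_cons.mp hq with rfl | hm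
        · exact le_of_lt hab
        · exact h q hm
      · intro h q hq; exact h q (by simp [hq])
    · subst hab
      rw [show scanB ((a, a) :: rest) true = scanB rest true from by rw [scanB]; simp]
      rw [ih]
      constructor
      · intro h q hq
        rcases List.mem_cons.mp hq with rfl | hm
        · exact le_refl a
        · exact h q hm
      · intro h q hq; exact h q (by simp [hq])
    · rw [show scanB ((a, b) :: rest) true = "No" from by rw [scanB]; simp [hab, not_lt.mpr (le_of_lt hab)]]
      constructor
      · intro h; exact absurd h (by decide)
      · intro h; exact absurd (h (a, b) (by simp)) (not_le.mpr hab)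

lemma zip_pairs_iff_chain : ∀ (xs : List Int),
    (∀ p ∈ xs.zip xs.tail, p.1 ≤ p.2) ↔ xs.IsChain (fun a b => a ≤ b) := by
  intro xs
  induction xs with
  | nil => simp
  | cons x t ih =>
    cases t with
    | nil => simp
    | cons y t' =>
      rw [List.isChain_cons_cons]
      constructor
      · intro h
        refine ⟨by simpa using h (x, y) (by simp), ih.mp ?_⟩
        intro p hp
        exact h p (by simp [List.zip] at hp ⊢; right; exact hp)
      · intro ⟨h1, h2⟩ p hp
        simp [List.zip] at hp
        rcases hp with rfl | hp
        · exact h1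
        · exact ih.mpr h2 p (by simpa [List.zip] using hp)

lemma zip_pairs_iff_pairwise : ∀ (xs : List Int),
    (∀ p ∈ xs.zip xs.tail, p.1 ≤ p.2) ↔ xs.Pairwise (fun a b => a ≤ b) := by
  intro xs
  rw [zip_pairs_iff_chain, List.isChain_iff_pairwise]

lemma scanB_dichotomy : ∀ (ps : List (Int × Int)) (f : Bool),
    scanB ps f = "Yes" ∨ scanB ps f = "No" := by
  intro ps
  induction ps with
  | nil => intro f; left; rfl
  | cons p rest ih =>
    intro f
    obtain ⟨a, b⟩ := p
    rw [scanB]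
    split_ifs with h1 h2
    · exact ih true
    · right; rfl
    · exact ih f

lemma func_alt_char (xs : List Int) : func_alt xs = "Yes" ↔ Valley xs := by
  unfold func_alt
  induction xs with
  | nil => simp [scanB, valley_nil]
  | cons x t ih =>
    cases t with
    | nil =>
      simp only [List.tail_cons, List.zip_nil_right, scanB]
      simp [valley_singleton]
    | cons y t' =>
      have hz : (x :: y :: t').zip (x :: y :: t').tail = (x, y) :: ((y :: t').zip (y :: t').tail) := by
        simp [List.zip]
      rw [hz]
      by_cases hxy : x < y
      · rw [show scanB ((x, y) :: ((y :: t').zip (y :: t').tail)) false = scanB ((y :: t').zip (y :: t').tail) true from by rw [scanB]; simp [hxy]]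
        rw [scanB_true, zip_pairs_iff_pairwise]
        constructor
        · intro h
          refine valley_of_pairwise (List.pairwise_cons.mpr ⟨?_, h⟩)
          intro b hb
          rcases List.mem_cons.mp hb with rfl | hm
          · exact le_of_lt hxy
          · exact le_trans (le_of_lt hxy) ((List.pairwise_cons.mp h).1 b hm)
        · intro h
          exact (valley_ascent_pairwise hxy h).of_cons
      · rw [show scanB ((x, y) :: ((y :: t').zip (y :: t').tail)) false = scanB ((y :: t').zip (y :: t').tail) false from by rw [scanB]; simp [hxy]]
        rw [ih]
        exact ⟨fun h => valley_cons_head h (not_lt.mp hxy), valley_tail⟩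

-- ===== VERDICT (by name: the statement is the Claim_ definition above) =====
theorem func_spec : Claim_equal_func := by
  intro bloks _
  unfold Spec_func
  have hA : func bloks = "Yes" ↔ Valley bloks := by
    rw [func_eq_gm, gm_char bloks.length bloks none rfl]
    constructor
    · exact fun h => h.1
    · intro h; exact ⟨h, by cases bloks with | nil => left; rfl | cons a t => right; simp [leC]⟩
  have hB := func_alt_char bloks
  by_cases hv : Valley bloks
  · rw [hA.mpr hv, (hB.mpr hv)]
  · have h1 : func bloks = "No" := by
      rcases gm_dichotomy bloks.length bloks none rfl with h | h
      · exact absurd (hA.mp (by rw [func_eq_gm]; exact h)) hv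
      · rw [func_eq_gm]; exact h
    have h2 : func_alt bloks = "No" := by
      rcases scanB_dichotomy (bloks.zip bloks.tail) false with h | h
      · exact absurd (hB.mp h) hv
      · exact h
    rw [h1, h2]
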